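-- pv_equiv track=rewrite | github.com/MolSSI/QCElemental | qcelemental/molutil/molecular_formula.py | molecular_formula_from_symbols
-- ===== SOURCE A (Python) =====
-- import collections
-- from typing import List
--
-- def molecular_formula_from_symbols(symbols: List[str], order: str = "alphabetical") -> str:
--     """
--     Returns the molecular formula for a list of symbols.
--
--     Parameters
--     ----------
--     symbols: List[str]
--         List of chemical symbols
--     order: str, optional
--         Sorting order of the formula. Valid choices are "alphabetical" and "hill".
--
--     Returns
--     -------
--     str
--         The molecular formula.
--     """
--
--     supported_orders = ["alphabetical", "hill"]
--     order = order.lower()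
--     if order not in supported_orders:
--         raise ValueError(f"Unsupported molecular formula order: {order}. Supported orders are f{supported_orders}.")
--     count = collections.Counter(x.title() for x in symbols)
--     element_order = sorted(count.keys())
--
--     if order == "hill" and "C" in element_order:
--         if "H" in element_order:
--             element_order.insert(0, element_order.pop(element_order.index("H")))
--         element_order.insert(0, element_order.pop(element_order.index("C")))
--
--     ret = []
--     for k in element_order:
--         c = count[k]
--         ret.append(k)
--         if c > 1:
--             ret.append(str(c))
--
--     return "".join(ret)
-- ===== SOURCE B (Python) =====
-- from typing import List
--
--
-- def molecular_formula_from_symbols(symbols: List[str], order: str = "alphabetical") -> str: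
--     """No Counter at all: title-case and sort the whole symbol list (Hill priority
--     baked into the sort key), then emit the formula in one run-length scan."""
--     order = order.lower()
--     if order not in ("alphabetical", "hill"):
--         raise ValueError(f"Unsupported molecular formula order: {order}.")
--     syms = [x.title() for x in symbols]
--     hill_c = order == "hill" and "C" in syms
--
--     def key(s: str) -> str:
--         if hill_c and s == "C":
--             return "0" + s
--         if hill_c and s == "H":
--             return "1" + s
--         return "2" + s
--
--     syms.sort(key=key)
--     out = []
--     i = 0
--     n = len(syms)
--     while i < n:
--         j = i
--         while j < n and syms[j] == syms[i]:
--             j += 1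
--         out.append(syms[i])
--         if j - i > 1:
--             out.append(str(j - i))
--         i = j
--     return "".join(out)
-- ===== Notes on version B (the rewrite author's own statement) =====
-- stated objective: alternative
-- what changed: A builds a Counter, sorts the distinct keys alphabetically and relocates C/H by index/pop/insert; B uses no dictionary at all: it sorts the whole title-cased symbol list (Hill priority baked into the sort key) and produces the formula in a single run-length scan over the sorted list.
import Mathlib
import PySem

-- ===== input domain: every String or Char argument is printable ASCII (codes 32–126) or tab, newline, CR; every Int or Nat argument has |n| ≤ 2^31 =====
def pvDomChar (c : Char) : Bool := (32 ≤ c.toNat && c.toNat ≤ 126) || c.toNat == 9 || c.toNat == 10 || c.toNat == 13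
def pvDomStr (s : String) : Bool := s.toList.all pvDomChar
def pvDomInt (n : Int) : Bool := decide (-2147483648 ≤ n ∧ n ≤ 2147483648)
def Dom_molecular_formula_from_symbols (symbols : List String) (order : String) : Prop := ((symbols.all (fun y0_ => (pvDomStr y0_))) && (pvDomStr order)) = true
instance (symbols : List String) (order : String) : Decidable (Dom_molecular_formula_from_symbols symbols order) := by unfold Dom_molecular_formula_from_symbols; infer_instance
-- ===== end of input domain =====

-- B drops A's Counter entirely: it sorts the whole title-cased symbol list (Hill
-- priority baked into the sort key) and emits the formula in one run-length scan.
-- Objective: alternative (different data flow, similar cost).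

-- Python str.title(), exact on the ASCII domain (cased characters = ASCII letters):
-- a letter after a non-letter is uppercased, a letter after a letter is lowercased.
def pyTitleChars : List Char → Bool → List Char
  | [], _ => []
  | c :: cs, prevCased =>
    if c.isAlpha then (if prevCased then c.toLower else c.toUpper) :: pyTitleChars cs true
    else c :: pyTitleChars cs false

def pyTitle (s : String) : String := String.ofList (pyTitleChars s.toList false)

-- ===== PORT A =====
-- 'l.insert(0, l.pop(l.index(v)))' (A does this twice, for "H" and "C"); the
-- 'none' branches are unreachable: A only runs it after checking v ∈ l.
def popInsertFront (l : List String) (v : String) : List String :=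
  match PySem.List.index? l v with
  | none => l
  | some i =>
    match PySem.List.pop? l (i : Int) with
    | none => l
    | some (x, rest) => PySem.List.insert rest 0 x

def elementOrderA (order : String) (ks : List String) : List String :=
  let element_order := PySem.List.sorted ks (fun x => x) false
  if order == "hill" && element_order.contains "C" then
    let eo1 := if element_order.contains "H" then popInsertFront element_order "H" else element_order
    popInsertFront eo1 "C"
  else element_order

def molecular_formula_from_symbols (symbols : List String) (order : String) : String :=
  let order := PySem.Str.lower order
  -- Python raises ValueError when order ∉ {"alphabetical","hill"}; Pre_ excludes that.
  let count := PySem.Dict.counter (symbols.map pyTitle)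
  let element_order := elementOrderA order count.keys
  let ret := element_order.foldl (fun acc k =>
      let c := count.getD k 0
      let acc := acc ++ [k]
      if c > 1 then acc ++ [PySem.Int.toStr c] else acc) ([] : List String)
  PySem.Str.join "" ret

-- ===== PORT B =====
-- Source B's nested 'key' function: priority prefix "0"/"1"/"2" + the symbol itself.
def hillKey (hillC : Bool) (sym : String) : String :=
  (if hillC && sym == "C" then "0" else if hillC && sym == "H" then "1" else "2") ++ sym

-- Source B's while loop: scan the run of elements equal to syms[i] (j - i = run length),
-- append the symbol and, when the run is longer than 1, its length; continue at j.
def rleEmit : List String → List String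
  | [] => []
  | x :: rest =>
    let run := rest.takeWhile (fun y => y == x)
    let c : Int := (run.length : Int) + 1
    (x :: (if c > 1 then [PySem.Int.toStr c] else [])) ++ rleEmit (rest.dropWhile (fun y => y == x))
termination_by l => l.length
decreasing_by
  have := List.length_dropWhile_le (fun y => y == x) rest
  simp only [List.length_cons]; omega

def molecular_formula_from_symbols_alt (symbols : List String) (order : String) : String :=
  let order := PySem.Str.lower order
  -- Python raises ValueError when order ∉ {"alphabetical","hill"}; Pre_ excludes that.
  let syms := symbols.map pyTitle
  let hillC := order == "hill" && syms.contains "C"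
  let ss := PySem.List.sorted syms (hillKey hillC) false
  PySem.Str.join "" (rleEmit ss)

-- ===== PRECONDITION & SPEC =====
-- Pre_ excludes exactly the inputs where A (and B alike) raises ValueError: order.lower()
-- is neither "alphabetical" nor "hill".
def Pre_molecular_formula_from_symbols (symbols : List String) (order : String) : Prop :=
  PySem.Str.lower order = "alphabetical" ∨ PySem.Str.lower order = "hill"
instance (symbols : List String) (order : String) : Decidable (Pre_molecular_formula_from_symbols symbols order) := by unfold Pre_molecular_formula_from_symbols; infer_instance

def pvWitness_molecular_formula_from_symbols : List String × String := (["H", "h", "c", "o", "H"], "Hill")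

def Spec_molecular_formula_from_symbols (symbols : List String) (order : String) (out : String) : Prop := out = molecular_formula_from_symbols_alt symbols order
instance (symbols : List String) (order : String) (out : String) : Decidable (Spec_molecular_formula_from_symbols symbols order out) := by unfold Spec_molecular_formula_from_symbols; infer_instance

-- ===== CLAIM (what is proved, stated in full; the proofs are below) =====
def Claim_equal_molecular_formula_from_symbols : Prop := ∀ (symbols : List String) (order : String), Dom_molecular_formula_from_symbols symbols order → Pre_molecular_formula_from_symbols symbols order → Spec_molecular_formula_from_symbols symbols order (molecular_formula_from_symbols symbols order)

-- ===== LEMMAS AND PROOFS =====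

-- String-order facts about the priority-prefixed keys.
lemma pv_lt_cons_head {c d : Char} (h : c < d) (a b : List Char) : (c :: a) < (d :: b) :=
  (List.lt_iff_lex_lt _ _).mpr (List.Lex.rel h)

lemma pv_lt_cons_tail (c : Char) {a b : List Char} (h : a < b) : (c :: a) < (c :: b) :=
  (List.lt_iff_lex_lt _ _).mpr (List.Lex.cons ((List.lt_iff_lex_lt _ _).mp h))

lemma pv_k01 (a b : String) : ("0" ++ a : String) < ("1" ++ b : String) := by
  rw [String.lt_iff_toList_lt]
  have h1 : ("0" ++ a).toList = '0' :: a.toList := by simp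
  have h2 : ("1" ++ b).toList = '1' :: b.toList := by simp
  rw [h1, h2]; exact pv_lt_cons_head (by decide) _ _

lemma pv_k02 (a b : String) : ("0" ++ a : String) < ("2" ++ b : String) := by
  rw [String.lt_iff_toList_lt]
  have h1 : ("0" ++ a).toList = '0' :: a.toList := by simp
  have h2 : ("2" ++ b).toList = '2' :: b.toList := by simp
  rw [h1, h2]; exact pv_lt_cons_head (by decide) _ _

lemma pv_k12 (a b : String) : ("1" ++ a : String) < ("2" ++ b : String) := by
  rw [String.lt_iff_toList_lt]
  have h1 : ("1" ++ a).toList = '1' :: a.toList := by simp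
  have h2 : ("2" ++ b).toList = '2' :: b.toList := by simp
  rw [h1, h2]; exact pv_lt_cons_head (by decide) _ _

lemma pv_k22 {a b : String} (h : a < b) : ("2" ++ a : String) < ("2" ++ b : String) := by
  rw [String.lt_iff_toList_lt]
  have h1 : ("2" ++ a).toList = '2' :: a.toList := by simp
  have h2 : ("2" ++ b).toList = '2' :: b.toList := by simp
  rw [h1, h2]; exact pv_lt_cons_tail _ (String.lt_iff_toList_lt.mp h)

lemma pv_eraseIdx_append (pre suf : List String) (v : String) :
    (pre ++ v :: suf).eraseIdx pre.length = pre ++ suf := by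
  induction pre with
  | nil => simp
  | cons a t ih => simp [ih]

-- A's 'l.insert(0, l.pop(l.index(v)))' moves the first occurrence of v to the front.
lemma popInsertFront_eq (l : List String) (v : String) (hv : v ∈ l) :
    popInsertFront l v = v :: l.erase v := by
  obtain ⟨k, hk⟩ := Option.isSome_iff_exists.mp ((PySem.List.index?_isSome_iff l v).mpr hv)
  obtain ⟨pre, suf, hsplit, hlen, hpre⟩ := (PySem.List.index?_eq_some_iff l v k).mp hk
  have hklen : k < l.length := by subst hsplit; simp [← hlen]
  unfold popInsertFront
  rw [hk]
  dsimp only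
  rw [PySem.List.pop?_natCast l k hklen]
  dsimp only
  rw [PySem.List.insert_zero]
  subst hsplit hlen
  rw [List.getElem_append_right (Nat.le_refl _)]
  simp [List.erase_append_right _ hpre, pv_eraseIdx_append]

-- A's post-sort surgery names the same order as a single keyed sort of the distinct keys.
lemma eo_key (olow : String) (ks : List String) (hnd : ks.Nodup) :
    elementOrderA olow ks =
      PySem.List.sorted ks (hillKey (olow == "hill" && ks.contains "C")) false := by
  have hperm := PySem.List.sorted_perm ks (fun x : String => x) false
  set es := PySem.List.sorted ks (fun x : String => x) false with hes
  have hesnd : es.Nodup := hperm.nodup_iff.mpr hnd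
  have heslt : es.Pairwise (· < ·) :=
    ((PySem.List.sorted_pairwise ks (fun x : String => x)).and hesnd).imp
      fun h => lt_of_le_of_ne h.1 h.2
  have hce : es.contains "C" = ks.contains "C" := by
    by_cases hm : ("C" : String) ∈ ks <;> simp [hperm.mem_iff, hm]
  simp only [elementOrderA]
  rw [← hes, hce]
  cases hb : (olow == "hill" && ks.contains "C") with
  | false =>
    simp only [Bool.false_eq_true, if_false]
    refine (PySem.List.sorted_eq_of_perm_of_pairwise_lt ks es _ hperm ?_).symm
    exact heslt.imp fun h => by simpa [hillKey] using pv_k22 h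
  | true =>
    simp only [if_true]
    have hC : ("C" : String) ∈ es := by
      rw [Bool.and_eq_true] at hb
      exact hperm.mem_iff.mpr (by simpa using hb.2)
    by_cases hH : ("H" : String) ∈ es
    · have hCeH : ("C" : String) ∈ es.erase "H" :=
        (hesnd.mem_erase_iff).mpr ⟨by decide, hC⟩
      rw [if_pos (by simpa using hH), popInsertFront_eq es "H" hH,
        popInsertFront_eq _ "C" (List.mem_cons_of_mem _ hCeH),
        List.erase_cons_tail (by decide)]
      set rest := (es.erase "H").erase "C" with hrest
      have hrest_mem : ∀ y ∈ rest, y ≠ "C" ∧ y ≠ "H" := by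
        intro y hy
        obtain ⟨hyC, hy'⟩ := ((hesnd.erase _).mem_erase_iff).mp hy
        exact ⟨hyC, ((hesnd.mem_erase_iff).mp hy').1⟩
      refine (PySem.List.sorted_eq_of_perm_of_pairwise_lt ks _ _ ?_ ?_).symm
      · exact (List.Perm.swap "H" "C" rest).trans
          ((List.Perm.cons _ (List.perm_cons_erase hCeH).symm).trans
            ((List.perm_cons_erase hH).symm.trans hperm))
      · refine List.pairwise_cons.mpr ⟨?_, List.pairwise_cons.mpr ⟨?_, ?_⟩⟩
        · intro y hy
          rcases List.mem_cons.mp hy with rfl | hy'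
          · simpa [hillKey] using pv_k01 "C" "H"
          · obtain ⟨h1, h2⟩ := hrest_mem y hy'
            simpa [hillKey, h1, h2] using pv_k02 "C" y
        · intro y hy
          obtain ⟨h1, h2⟩ := hrest_mem y hy
          simpa [hillKey, h1, h2] using pv_k12 "H" y
        · have hsub : rest.Sublist es :=
            List.erase_sublist.trans List.erase_sublist
          refine List.Pairwise.imp_of_mem ?_ (heslt.sublist hsub)
          intro a b ha hb' hab
          obtain ⟨ha1, ha2⟩ := hrest_mem a ha
          obtain ⟨hb1, hb2⟩ := hrest_mem b hb'
          simpa [hillKey, ha1, ha2, hb1, hb2] using pv_k22 hab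
    · rw [if_neg (by simpa using hH), popInsertFront_eq es "C" hC]
      have hmem : ∀ y ∈ es.erase "C", y ≠ "C" ∧ y ≠ "H" := by
        intro y hy
        obtain ⟨h1, h2⟩ := (hesnd.mem_erase_iff).mp hy
        exact ⟨h1, fun h => hH (h ▸ h2)⟩
      refine (PySem.List.sorted_eq_of_perm_of_pairwise_lt ks _ _
        (((List.perm_cons_erase hC).symm).trans hperm) ?_).symm
      refine List.pairwise_cons.mpr ⟨?_, ?_⟩
      · intro y hy
        obtain ⟨h1, h2⟩ := hmem y hy
        simpa [hillKey, h1, h2] using pv_k02 "C" y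
      · refine List.Pairwise.imp_of_mem ?_ (heslt.sublist List.erase_sublist)
        intro a b ha hb' hab
        obtain ⟨ha1, ha2⟩ := hmem a ha
        obtain ⟨hb1, hb2⟩ := hmem b hb'
        simpa [hillKey, ha1, ha2, hb1, hb2] using pv_k22 hab

-- hillKey is injective (the priority prefix is determined by the symbol).
lemma hillKey_inj (hc : Bool) : Function.Injective (hillKey hc) := by
  intro a b h
  unfold hillKey at h
  have h' := congrArg String.toList h
  split_ifs at h' with h1 h2 h3 h4 h5 <;>
    simp_all [String.toList_append, ← String.toList_inj]

-- count of v in a flatMap of replicates over a nodup list.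
lemma pv_count_flatMap (e : List String) (f : String → Nat) (hnd : e.Nodup) (v : String) :
    (e.flatMap fun k => List.replicate (f k) k).count v = if v ∈ e then f v else 0 := by
  induction e with
  | nil => simp
  | cons k t ih =>
    rcases List.nodup_cons.mp hnd with ⟨hk, ht⟩
    by_cases hv : v = k
    · subst hv
      rw [List.flatMap_cons, List.count_append, ih ht, if_neg hk, List.count_replicate]
      simp
    · rw [List.flatMap_cons, List.count_append, ih ht, List.count_replicate, if_neg (by simpa using Ne.symm hv)]
      simp [List.mem_cons, hv]

lemma pv_perm_flatMap (e syms : List String) (hnd : e.Nodup)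
    (hmem : ∀ v, v ∈ e ↔ v ∈ syms) :
    (e.flatMap fun k => List.replicate (syms.count k) k).Perm syms := by
  rw [List.perm_iff_count]
  intro v
  rw [pv_count_flatMap e _ hnd v]
  by_cases hv : v ∈ syms
  · simp [(hmem v).mpr hv]
  · simp [hv, fun h => hv ((hmem v).mp h), List.count_eq_zero_of_not_mem hv]

lemma pv_pairwise_flatMap (e : List String) (key : String → String) (f : String → Nat)
    (hp : e.Pairwise (fun a b => key a < key b)) :
    (e.flatMap fun k => List.replicate (f k) k).Pairwise (fun a b => key a ≤ key b) := by
  induction e with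
  | nil => simp
  | cons k t ih =>
    rcases List.pairwise_cons.mp hp with ⟨hk, ht⟩
    simp only [List.flatMap_cons]
    rw [List.pairwise_append]
    refine ⟨?_, ih ht, ?_⟩
    · refine List.pairwise_of_forall_mem_list ?_
      intro a ha b hb
      obtain rfl := List.eq_of_mem_replicate ha
      obtain rfl := List.eq_of_mem_replicate hb
      exact le_refl _
    · intro a ha b hb
      obtain rfl := List.eq_of_mem_replicate ha
      obtain ⟨k', hk', hb'⟩ := List.mem_flatMap.mp hb
      obtain rfl := List.eq_of_mem_replicate hb'
      exact le_of_lt (hk _ hk')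

-- the full keyed sort groups the duplicates behind the keyed sort of the distinct keys
lemma pv_sorted_flatMap (syms e : List String) (key : String → String)
    (hinj : Function.Injective key) (hnd : e.Nodup)
    (hmem : ∀ v, v ∈ e ↔ v ∈ syms)
    (hp : e.Pairwise (fun a b => key a < key b)) :
    PySem.List.sorted syms key false = e.flatMap fun k => List.replicate (syms.count k) k := by
  have hperm : (PySem.List.sorted syms key false).Perm
      (e.flatMap fun k => List.replicate (syms.count k) k) :=
    (PySem.List.sorted_perm syms key false).trans (pv_perm_flatMap e syms hnd hmem).symm
  have h1 : ((PySem.List.sorted syms key false).map key).Pairwise (· ≤ ·) :=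
    List.pairwise_map.mpr (PySem.List.sorted_pairwise syms key)
  have h2 : (((e.flatMap fun k => List.replicate (syms.count k) k)).map key).Pairwise (· ≤ ·) :=
    List.pairwise_map.mpr (pv_pairwise_flatMap e key _ hp)
  exact List.map_injective_iff.mpr hinj (List.Perm.eq_of_pairwise' h1 h2 (hperm.map key))

lemma pv_takeWhile_append {p : String → Bool} {l₁ l₂ : List String}
    (h : ∀ a ∈ l₁, p a = true) :
    (l₁ ++ l₂).takeWhile p = l₁ ++ l₂.takeWhile p ∧ (l₁ ++ l₂).dropWhile p = l₂.dropWhile p := by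
  induction l₁ with
  | nil => simp
  | cons a t ih =>
    have ha := h a (List.mem_cons_self ..)
    have := ih fun x hx => h x (List.mem_cons_of_mem _ hx)
    simp [List.takeWhile_cons, List.dropWhile_cons, ha, this.1, this.2]

-- run-length emission of the grouped list = per-key emission of A's final loop
lemma pv_rle_flat (e : List String) (f : String → Nat) (hnd : e.Nodup)
    (hpos : ∀ k ∈ e, 0 < f k) :
    rleEmit (e.flatMap fun k => List.replicate (f k) k) =
      e.flatMap fun k =>
        k :: (if (f k : Int) > 1 then [PySem.Int.toStr (f k)] else []) := by
  induction e with
  | nil => simp [rleEmit]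
  | cons k t ih =>
    rcases List.nodup_cons.mp hnd with ⟨hk, ht⟩
    have hposk := hpos k (List.mem_cons_self ..)
    have hrep : List.replicate (f k) k = k :: List.replicate (f k - 1) k := by
      cases hfk : f k with
      | zero => omega
      | succ m => simp [List.replicate_succ]
    have htail : ∀ a ∈ (t.flatMap fun k' => List.replicate (f k') k'), (a == k) = false := by
      intro a ha
      obtain ⟨k', hk', ha'⟩ := List.mem_flatMap.mp ha
      obtain rfl := List.eq_of_mem_replicate ha'
      exact beq_eq_false_iff_ne.mpr fun h => hk (h ▸ hk')
    have htw : ∀ l2, (List.replicate (f k - 1) k ++ l2).takeWhile (fun y => y == k) =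
        List.replicate (f k - 1) k ++ l2.takeWhile (fun y => y == k) ∧
        (List.replicate (f k - 1) k ++ l2).dropWhile (fun y => y == k) =
        l2.dropWhile (fun y => y == k) :=
      fun l2 => pv_takeWhile_append fun a ha => by
        obtain rfl := List.eq_of_mem_replicate ha; simp
    have htw2 : (t.flatMap fun k' => List.replicate (f k') k').takeWhile (fun y => y == k) = [] := by
      cases hfl : (t.flatMap fun k' => List.replicate (f k') k') with
      | nil => simp
      | cons a l => simp [List.takeWhile_cons, htail a (hfl ▸ List.mem_cons_self ..)]
    have htw3 : (t.flatMap fun k' => List.replicate (f k') k').dropWhile (fun y => y == k) =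
        t.flatMap fun k' => List.replicate (f k') k' := by
      cases hfl : (t.flatMap fun k' => List.replicate (f k') k') with
      | nil => simp
      | cons a l => simp [List.dropWhile_cons, htail a (hfl ▸ List.mem_cons_self ..)]
    rw [List.flatMap_cons, hrep, List.cons_append, rleEmit]
    rw [(htw _).1, (htw _).2, htw2, htw3, List.append_nil, List.length_replicate]
    rw [ih ht fun x hx => hpos x (List.mem_cons_of_mem _ hx)]
    have hc : ((f k - 1 : Nat) : Int) + 1 = (f k : Int) := by omega
    simp only [hc, List.flatMap_cons, List.cons_append, List.nil_append]

-- ===== VERDICT (by name: the statement is the Claim_ definition above) =====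
theorem molecular_formula_from_symbols_spec : Claim_equal_molecular_formula_from_symbols := by
  intro symbols order _hdom _hpre
  unfold Spec_molecular_formula_from_symbols
  simp only [molecular_formula_from_symbols, molecular_formula_from_symbols_alt]
  set olow := PySem.Str.lower order
  set syms := symbols.map pyTitle with hsyms
  set count := PySem.Dict.counter syms with hcount
  set ks := count.keys with hks
  have hknd : ks.Nodup := PySem.Dict.nodup_keys_counter _
  have hkmem : ∀ v, v ∈ ks ↔ v ∈ syms := by
    intro v
    simp [hks, hcount, PySem.Dict.keys_counter, PySem.Set.mem_ofList]
  have hcc : syms.contains "C" = ks.contains "C" := by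
    by_cases hm : ("C" : String) ∈ syms <;> simp [hkmem, hm]
  set hc := olow == "hill" && ks.contains "C" with hhc
  have heo := eo_key olow ks hknd
  have heop : (elementOrderA olow ks).Pairwise (fun a b => hillKey hc a < hillKey hc b) := by
    rw [heo]
    have hle := PySem.List.sorted_pairwise ks (hillKey hc)
    have hnd' : (PySem.List.sorted ks (hillKey hc) false).Nodup :=
      (PySem.List.sorted_perm ks (hillKey hc) false).nodup_iff.mpr hknd
    exact (hle.and hnd').imp fun ⟨h1, h2⟩ =>
      lt_of_le_of_ne h1 fun he => h2 (hillKey_inj hc he)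
  have heomem : ∀ v, v ∈ elementOrderA olow ks ↔ v ∈ syms := by
    intro v
    rw [heo, PySem.List.mem_sorted]
    exact hkmem v
  have heond : (elementOrderA olow ks).Nodup := by
    rw [heo]; exact (PySem.List.sorted_perm ks (hillKey hc) false).nodup_iff.mpr hknd
  rw [hcc]
  rw [pv_sorted_flatMap syms (elementOrderA olow ks) (hillKey hc) (hillKey_inj hc)
      heond heomem heop]
  rw [pv_rle_flat _ (fun k => syms.count k) heond
      (fun k hk => List.count_pos_iff.mpr ((heomem k).mp hk))]
  congr 1
  rw [PySem.List.foldl_congr_mem (g := fun acc k => acc ++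
      (k :: (if ((syms.count k : Nat) : Int) > 1 then [PySem.Int.toStr (syms.count k)] else [])))]
  · rw [PySem.List.foldl_append_eq_flatMap, List.nil_append]
  · intro acc k _
    simp only [hcount, PySem.Dict.getD_counter]
    split <;> simp [List.append_assoc]
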